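-- pv_equiv track=rewrite | github.com/Ahn-Ssu/Algorithm_POSTECH | POSTECH/assn5 - DynamicProgramming/hard_Tile.py | way
-- ===== SOURCE A (Python) =====
-- def way(n):
--     SIZE = 3
--     ZERO = [[1, 0, 0], [0, 1, 0], [0,0,1]]
--     BASE = [[3, 1, -1], [1, 0,0], [0,1,0]]
--
--     # 두 행렬의 곱을 구한다
--     def square_matrix_mul(a, b, size=SIZE):
--         new = [[0 for _ in range(size)] for _ in range(size)]
--
--         for i in range(size):
--             for j in range(size):
--                 for k in range(size):
--                     new[i][j] += a[i][k] * b[k][j]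
--
--         return new
--
--     # 기본 행렬을 n번 곱한 행렬을 만든다
--     def get_nth(n):
--         matrix = ZERO.copy()
--         k = 0
--         tmp = BASE.copy()
--
--         while 2 ** k <= n:
--             if n & (1 << k) != 0:
--                 matrix = square_matrix_mul(matrix, tmp)
--             k += 1
--             tmp = square_matrix_mul(tmp, tmp)
--
--         return matrix
--
--     return get_nth(n)[1][0]
-- ===== SOURCE B (Python) =====
-- def way(n):
--     # Direct iterative DP on the recurrence a(k) = 3*a(k-1) + a(k-2) - a(k-3),
--     # with a(0)=0, a(1)=1, a(2)=3; returns 0 for n <= 0 (as the identity matrix does).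
--     if n <= 0:
--         return 0
--     if n == 1:
--         return 1
--     if n == 2:
--         return 3
--     a, b, c = 0, 1, 3
--     for _ in range(3, n + 1):
--         a, b, c = b, c, 3 * c + b - a
--     return c
-- ===== Notes on version B (the rewrite author's own statement) =====
-- stated objective: simpler
-- what changed: Replaced the 3x3 matrix fast-exponentiation (binary powering with hand-written matrix multiplication) by a plain linear DP that keeps the last three values of the recurrence a(n)=3a(n-1)+a(n-2)-a(n-3).
import Mathlib
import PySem

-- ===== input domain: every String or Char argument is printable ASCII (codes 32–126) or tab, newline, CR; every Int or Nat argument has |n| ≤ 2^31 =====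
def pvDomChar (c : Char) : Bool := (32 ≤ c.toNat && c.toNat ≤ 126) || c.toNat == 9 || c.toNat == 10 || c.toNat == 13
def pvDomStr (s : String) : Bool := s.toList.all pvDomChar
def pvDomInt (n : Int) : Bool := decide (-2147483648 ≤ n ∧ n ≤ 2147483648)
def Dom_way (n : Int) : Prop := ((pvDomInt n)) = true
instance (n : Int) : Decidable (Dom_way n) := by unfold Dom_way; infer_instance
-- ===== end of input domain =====

-- B replaces A's binary matrix exponentiation by a plain linear DP over the
-- recurrence a(n)=3a(n-1)+a(n-2)-a(n-3); same exact values, simpler code.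

-- ===== PORT A =====
-- 3x3 matrix as a record of its nine entries (row-major).
structure Mat where
  m00 : Int
  m01 : Int
  m02 : Int
  m10 : Int
  m11 : Int
  m12 : Int
  m20 : Int
  m21 : Int
  m22 : Int
deriving DecidableEq, Repr

def ZERO : Mat := ⟨1,0,0, 0,1,0, 0,0,1⟩
def BASE : Mat := ⟨3,1,-1, 1,0,0, 0,1,0⟩

-- square_matrix_mul: the fixed-size (SIZE=3) triple loop, unrolled entry by entry;
-- each entry is exactly the k-sum a[i][k]*b[k][j] the Python loop accumulates.
def mulM (a b : Mat) : Mat :=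
  ⟨a.m00*b.m00 + a.m01*b.m10 + a.m02*b.m20,
   a.m00*b.m01 + a.m01*b.m11 + a.m02*b.m21,
   a.m00*b.m02 + a.m01*b.m12 + a.m02*b.m22,
   a.m10*b.m00 + a.m11*b.m10 + a.m12*b.m20,
   a.m10*b.m01 + a.m11*b.m11 + a.m12*b.m21,
   a.m10*b.m02 + a.m11*b.m12 + a.m12*b.m22,
   a.m20*b.m00 + a.m21*b.m10 + a.m22*b.m20,
   a.m20*b.m01 + a.m21*b.m11 + a.m22*b.m21,
   a.m20*b.m02 + a.m21*b.m12 + a.m22*b.m22⟩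

-- the 'while 2 ** k <= n' loop of get_nth; terminates because 2^k grows past n
def getNthLoop (n : Int) (k : Nat) (matrix tmp : Mat) : Mat :=
  if h : (2:Int)^k ≤ n then
    getNthLoop n (k+1)
      (if PySem.Int.band n (((1 <<< k : Nat) : Int)) ≠ 0 then mulM matrix tmp else matrix)
      (mulM tmp tmp)
  else matrix
termination_by n.toNat + 1 - 2^k
decreasing_by
  have h1 : ((2:Nat)^k : Int) ≤ n := by push_cast; exact h
  have h2 : (2:Nat)^k ≤ n.toNat := by omega
  have h3 : (2:Nat)^k < 2^(k+1) := Nat.pow_lt_pow_right (by norm_num) (Nat.lt_succ_self k)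
  omega

def way (n : Int) : Int := (getNthLoop n 0 ZERO BASE).m10

-- ===== PORT B =====
-- the 'for _ in range(3, n+1)' loop of Source B, rotating the last three values
def altLoop : Nat → Int → Int → Int → Int
  | 0, _, _, c => c
  | m+1, a, b, c => altLoop m b c (3*c + b - a)

def way_alt (n : Int) : Int :=
  if n ≤ 0 then 0
  else if n = 1 then 1
  else if n = 2 then 3
  else altLoop (n - 2).toNat 0 1 3

-- ===== PRECONDITION & SPEC =====
def Spec_way (n : Int) (out : Int) : Prop := out = way_alt n
instance (n : Int) (out : Int) : Decidable (Spec_way n out) := by unfold Spec_way; infer_instance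

-- ===== CLAIM (what is proved, stated in full; the proofs are below) =====
def Claim_equal_way : Prop := ∀ (n : Int), Dom_way n → Spec_way n (way n)

-- ===== LEMMAS AND PROOFS =====

-- the shifted sequence: aa (m+1) = a(m), the tiling count
def aa : Nat → Int
  | 0 => 0
  | 1 => 0
  | 2 => 1
  | m+3 => 3 * aa (m+2) + aa (m+1) - aa m

def matPow : Nat → Mat
  | 0 => ZERO
  | m+1 => mulM (matPow m) BASE

lemma mulM_zero_left (x : Mat) : mulM ZERO x = x := by
  cases x; simp only [mulM, ZERO, Mat.mk.injEq]; and_intros <;> ring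

lemma mulM_zero_right (x : Mat) : mulM x ZERO = x := by
  cases x; simp only [mulM, ZERO, Mat.mk.injEq]; and_intros <;> ring

lemma mulM_assoc (x y z : Mat) : mulM (mulM x y) z = mulM x (mulM y z) := by
  cases x; cases y; cases z; simp only [mulM, Mat.mk.injEq]; and_intros <;> ring

lemma matPow_add (i j : Nat) : matPow (i + j) = mulM (matPow i) (matPow j) := by
  induction j with
  | zero => simp [matPow, mulM_zero_right]
  | succ j ih => rw [show i + (j+1) = (i+j)+1 from rfl, matPow, ih, matPow, mulM_assoc]

lemma matPow_row1 (m : Nat) :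
    (matPow m).m10 = aa (m+1) ∧ (matPow m).m11 = aa (m+2) - 3 * aa (m+1) ∧
    (matPow m).m12 = -aa m := by
  induction m with
  | zero => refine ⟨rfl, ?_, rfl⟩; decide
  | succ m ih =>
    obtain ⟨h1, h2, h3⟩ := ih
    refine ⟨?_, ?_, ?_⟩ <;>
      simp only [matPow, mulM, BASE, h1, h2, h3, show aa (m+3) = 3 * aa (m+2) + aa (m+1) - aa m from rfl] <;> ring

-- loop invariant for getNthLoop: with tmp = BASE^(2^k) it multiplies matrix by
-- BASE^((n/2^k)*2^k)
lemma loop_inv (m : Nat) :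
    ∀ fuel k M, m + 1 - 2^k ≤ fuel →
      getNthLoop (↑m) k M (matPow (2^k)) = mulM M (matPow ((m / 2^k) * 2^k)) := by
  intro fuel
  induction fuel with
  | zero =>
    intro k M hf
    have hk : m < 2^k := by omega
    have hc : ¬ ((2:Int)^k ≤ (m:Int)) := by exact_mod_cast Nat.not_le.mpr hk
    rw [getNthLoop, dif_neg hc, Nat.div_eq_of_lt hk, Nat.zero_mul]
    exact (mulM_zero_right M).symm
  | succ fuel ih =>
    intro k M hf
    by_cases hc : (2:Int)^k ≤ (m:Int)
    · rw [getNthLoop, dif_pos hc]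
      have hkle : (2:Nat)^k ≤ m := by exact_mod_cast hc
      have hlt : (2:Nat)^k < 2^(k+1) := Nat.pow_lt_pow_right (by norm_num) (Nat.lt_succ_self k)
      have hpow : matPow (2^(k+1)) = mulM (matPow (2^k)) (matPow (2^k)) := by
        rw [show (2:Nat)^(k+1) = 2^k + 2^k by ring, matPow_add]
      have hrec := ih (k+1) (if PySem.Int.band (↑m) (((1 <<< k : Nat) : Int)) ≠ 0
                              then mulM M (matPow (2^k)) else M)
                      (by omega)
      rw [hpow] at hrec
      rw [hrec]
      set q := m / 2^k with hq
      have hq2 : m / 2^(k+1) = q / 2 := by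
        rw [pow_succ, ← Nat.div_div_eq_div_mul]
      have hpos : (0:Nat) < 2^k := Nat.two_pow_pos k
      have hbit : (PySem.Int.band (↑m) (((1 <<< k : Nat) : Int)) ≠ 0) ↔ q % 2 = 1 := by
        rw [PySem.Int.band_natCast, Nat.one_shiftLeft, Nat.and_two_pow,
            Nat.testBit_eq_decide_div_mod_eq, ← hq]
        by_cases hb : q % 2 = 1 <;> simp [hb]
      rw [hq2]
      by_cases hb : q % 2 = 1
      · rw [if_pos (hbit.mpr hb)]
        have hqe : q = 2 * (q / 2) + 1 := by omega
        have heq : q * 2^k = 2^k + (q / 2) * 2^(k+1) := by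
          rw [pow_succ]; nlinarith [hqe]
        rw [heq, matPow_add, mulM_assoc]
      · rw [if_neg (fun h => hb (hbit.mp h))]
        have hqe : q = 2 * (q / 2) := by omega
        have heq : q * 2^k = (q / 2) * 2^(k+1) := by
          rw [pow_succ]; nlinarith [hqe]
        rw [heq]
    · have hk : m < 2^k := by
        by_contra h
        exact hc (by exact_mod_cast Nat.le_of_not_lt h)
      rw [getNthLoop, dif_neg hc, Nat.div_eq_of_lt hk, Nat.zero_mul]
      exact (mulM_zero_right M).symm

lemma way_nonneg (n : Int) (hn : 0 ≤ n) : way n = aa (n.toNat + 1) := by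
  obtain ⟨m, rfl⟩ : ∃ m : Nat, n = ↑m := ⟨n.toNat, (Int.toNat_of_nonneg hn).symm⟩
  have h1 : matPow (2^0) = BASE := by decide
  have h := loop_inv m (m + 1 - 2^0) 0 ZERO (le_refl _)
  rw [h1] at h
  unfold way
  rw [h, mulM_zero_left]
  simp only [pow_zero, Nat.div_one, Nat.mul_one, Int.toNat_natCast]
  exact (matPow_row1 m).1

lemma way_neg (n : Int) (hn : n < 0) : way n = 0 := by
  unfold way
  rw [getNthLoop, dif_neg (by rw [pow_zero]; omega : ¬ ((2:Int)^0 ≤ n))]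
  rfl

lemma altLoop_aa (m : Nat) : ∀ j, altLoop m (aa (j+1)) (aa (j+2)) (aa (j+3)) = aa (j+3+m) := by
  induction m with
  | zero => intro j; rfl
  | succ m ih =>
    intro j
    have hrec : 3 * aa (j+3) + aa (j+2) - aa (j+1) = aa (j+4) := rfl
    rw [altLoop, hrec]
    have := ih (j+1)
    rw [show j+1+1 = j+2 from rfl, show j+1+2 = j+3 from rfl, show j+1+3 = j+4 from rfl] at this
    rw [this]
    congr 1
    omega

-- ===== VERDICT (by name: the statement is the Claim_ definition above) =====
theorem way_spec : Claim_equal_way := by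
  intro n _
  unfold Spec_way way_alt
  by_cases hneg : n < 0
  · rw [way_neg n hneg, if_pos (by omega)]
  · have hn : 0 ≤ n := by omega
    rw [way_nonneg n hn]
    by_cases h0 : n ≤ 0
    · have : n = 0 := by omega
      subst this
      simp
      decide
    · rw [if_neg h0]
      by_cases h1 : n = 1
      · subst h1; decide
      · rw [if_neg h1]
        by_cases h2 : n = 2
        · subst h2; decide
        · rw [if_neg h2]
          have h3 : 3 ≤ n := by omega
          have hnt : 3 ≤ n.toNat := by omega
          have hsub : (n - 2).toNat = n.toNat - 2 := by omega
          rw [hsub]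
          have := altLoop_aa (n.toNat - 2) 0
          simp only [Nat.zero_add] at this
          have haa : (0:Int) = aa 1 := by decide
          have hbb : (1:Int) = aa 2 := by decide
          have hcc : (3:Int) = aa 3 := by decide
          rw [haa, hbb, hcc, this]
          congr 1
          omega
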